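-- pv_equiv track=rewrite | github.com/Asinski/computer-science | algorithms/search/binary-search.py | left_border
-- ===== SOURCE A (Python) =====
-- def left_border(seq, num):
--     left = -1
--     right = len(seq)
--     while right - left > 1:
--         middle = (left + right) // 2
--         if seq[middle] < num:
--             left = middle
--         else:
--             right = middle
--
--     return left
-- ===== SOURCE B (Python) =====
-- def left_border(seq, num):
--     def f(w):
--         if not w:
--             return -1
--         m = (len(w) + 1) // 2 - 1
--         if w[m] < num:
--             return m + 1 + f(w[m + 1:])
--         return f(w[:m])
--     return f(seq)
-- ===== Notes on version B (the rewrite author's own statement) =====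
-- stated objective: alternative
-- what changed: Replaced the iterative two-index (left,right) while-loop with a recursion on slices of the list: the helper recurses on w[:m] or w[m+1:] and adds back the offset, no index pair is maintained.
import Mathlib
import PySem

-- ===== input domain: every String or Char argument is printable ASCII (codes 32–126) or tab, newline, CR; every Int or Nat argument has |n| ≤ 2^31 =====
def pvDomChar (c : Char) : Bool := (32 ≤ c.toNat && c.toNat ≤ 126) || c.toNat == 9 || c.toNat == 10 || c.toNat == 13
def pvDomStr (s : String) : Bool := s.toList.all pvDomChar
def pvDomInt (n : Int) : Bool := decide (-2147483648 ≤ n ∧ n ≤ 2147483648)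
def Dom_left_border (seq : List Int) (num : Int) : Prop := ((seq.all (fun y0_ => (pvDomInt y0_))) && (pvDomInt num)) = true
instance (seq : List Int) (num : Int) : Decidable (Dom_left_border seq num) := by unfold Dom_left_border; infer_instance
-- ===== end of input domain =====

-- B replaces A's iterative two-index while-loop by a recursion on slices of the list (alternative
-- decomposition, same probe sequence, same cost in probes). A is total; no Pre_ is needed.

-- ===== PORT A =====
-- A's while-loop as structural recursion over the same state (left, right); the fuel only makes the
-- loop total (each iteration shrinks right - left by at least 1, so seq.length + 1 is never exhausted
-- from the top-level call), and the loop always probes in range, so the `.getD 0` default of the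
-- in-range access is never taken from the top-level call.
def left_border_loop (seq : List Int) (num : Int) : Nat → Int → Int → Int
  | 0, left, _ => left
  | fuel + 1, left, right =>
    if right - left > 1 then
      let middle := PySem.Int.floordiv (left + right) 2
      if PySem.List.pyGetD seq middle 0 < num then
        left_border_loop seq num fuel middle right
      else
        left_border_loop seq num fuel left middle
    else
      left

def left_border (seq : List Int) (num : Int) : Int :=
  left_border_loop seq num (seq.length + 1) (-1) (PySem.List.len seq)

-- ===== PORT B =====
-- Source B's inner helper f, the fuel only making the recursion total (each call strictly shrinks the
-- window, so seq.length + 1 is never exhausted from the top-level call); w[:m] / w[m+1:] are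
-- take/drop, exactly Python's slices for these nonnegative in-range bounds.
def left_border_alt_go (num : Int) : Nat → List Int → Int
  | 0, _ => -1
  | fuel + 1, w =>
    if w.length = 0 then -1
    else
      let m := (w.length + 1) / 2 - 1
      if w.getD m 0 < num then
        (m : Int) + 1 + left_border_alt_go num fuel (w.drop (m + 1))
      else
        left_border_alt_go num fuel (w.take m)

def left_border_alt (seq : List Int) (num : Int) : Int :=
  left_border_alt_go num (seq.length + 1) seq

-- ===== PRECONDITION & SPEC =====
def Spec_left_border (seq : List Int) (num : Int) (out : Int) : Prop := out = left_border_alt seq num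
instance (seq : List Int) (num : Int) (out : Int) : Decidable (Spec_left_border seq num out) := by unfold Spec_left_border; infer_instance

-- ===== CLAIM (what is proved, stated in full; the proofs are below) =====
def Claim_equal_left_border : Prop := ∀ (seq : List Int) (num : Int), Dom_left_border seq num → Spec_left_border seq num (left_border seq num)

-- ===== LEMMAS AND PROOFS =====

-- Loop/recursion correspondence at EQUAL fuel: A's loop state (left, right) corresponds to B's
-- window seq[left+1 : right], and the loop's result is left + 1 + (B's result on that window).
theorem loop_eq_go (seq : List Int) (num : Int) :
    ∀ (fuel : Nat) (left right : Int), -1 ≤ left → left < right → right ≤ seq.length →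
      left_border_loop seq num fuel left right =
        left + 1 + left_border_alt_go num fuel ((seq.drop (left + 1).toNat).take (right - left - 1).toNat) := by
  intro fuel
  induction fuel with
  | zero => intro left right _ _ _; simp [left_border_loop, left_border_alt_go]
  | succ f ih =>
    intro left right h1 h2 h3
    by_cases hgt : right - left > 1
    · -- loop iterates; the window is nonempty
      have hdm := PySem.Int.floordiv_mul_add_mod (left + right) 2
      have hm1 := PySem.Int.mod_nonneg (left + right) (b := 2) (by omega)
      have hm2 := PySem.Int.mod_lt (left + right) (b := 2) (by omega)
      set middle := PySem.Int.floordiv (left + right) 2 with hmid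
      have hmlb : left < middle := by omega
      have hmub : middle < right := by omega
      set w : List Int := (seq.drop (left + 1).toNat).take (right - left - 1).toNat with hw
      have hwlen : w.length = (right - left - 1).toNat := by
        simp [hw]; omega
      have hwne : w.length ≠ 0 := by omega
      set m : Nat := (w.length + 1) / 2 - 1 with hm
      have hmrel : (m : Int) = middle - left - 1 := by omega
      have hmltw : m < w.length := by omega
      -- the probed elements agree
      have hprobe : PySem.List.pyGetD seq middle 0 = w.getD m 0 := by
        rw [PySem.List.pyGetD_eq_getElem seq (i := middle) 0 (by omega) (by omega)]
        rw [List.getD_eq_getElem w 0 hmltw]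
        show seq[middle.toNat] =
          ((seq.drop (left + 1).toNat).take (right - left - 1).toNat)[m]'(hw ▸ hmltw)
        rw [List.getElem_take, List.getElem_drop]
        congr 1
        omega
      rw [left_border_loop, left_border_alt_go]
      simp only [hgt, hwne, if_true, if_false, ← hmid, ← hm]
      rw [hprobe]
      by_cases hlt : w.getD m 0 < num
      · simp only [hlt, if_true]
        rw [ih middle right (by omega) (by omega) h3]
        have hdrop : (seq.drop (middle + 1).toNat).take (right - middle - 1).toNat = w.drop (m + 1) := by
          rw [hw, List.drop_take, List.drop_drop,
            show (middle + 1).toNat = (left + 1).toNat + (m + 1) by omega,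
            show (right - middle - 1).toNat = (right - left - 1).toNat - (m + 1) by omega]
        rw [hdrop]; omega
      · simp only [hlt, if_false]
        rw [ih left middle h1 (by omega) (by omega)]
        have htake : (seq.drop (left + 1).toNat).take (middle - left - 1).toNat = w.take m := by
          rw [hw, List.take_take, show (middle - left - 1).toNat = min m (right - left - 1).toNat by omega]
        rw [htake]
    · -- loop exits: right - left = 1, window empty
      rw [left_border_loop, left_border_alt_go]
      have : (right - left - 1).toNat = 0 := by omega
      simp [hgt, this]

-- ===== VERDICT (by name: the statement is the Claim_ definition above) =====
theorem left_border_spec : Claim_equal_left_border := by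
  intro seq num _
  unfold Spec_left_border left_border left_border_alt
  rw [PySem.List.len_eq]
  rw [loop_eq_go seq num (seq.length + 1) (-1) seq.length (by omega) (by omega) (by omega),
    show ((-1 : Int) + 1).toNat = 0 from rfl,
    show ((seq.length : Int) - (-1) - 1).toNat = seq.length by omega]
  simp
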